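-- pv_equiv track=rewrite | github.com/psmteja/shortest_temporal_path | src/temporal_path_from_file.py | _all_valid_starts_for_length
-- ===== SOURCE A (Python) =====
-- from typing import Optional, List, Tuple, Dict
--
-- def _find_all_runs_of_ones(cs: List[int]) -> List[Tuple[int, int]]:
--     runs, i, n = [], 0, len(cs)
--     while i < n:
--         if cs[i] == 1:
--             j = i
--             while j + 1 < n and cs[j + 1] == 1:
--                 j += 1
--             runs.append((i, j))
--             i = j + 1
--         else:
--             i += 1
--     return runs
--
-- def _all_valid_starts_for_length(cs: List[int], min_len: int, after_idx: int = -1) -> List[int]: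
--     if min_len <= 0:
--         return []
--     starts: List[int] = []
--     for L, R in _find_all_runs_of_ones(cs):
--         if (R - L + 1) < min_len:
--             continue
--         j0 = max(L, after_idx + 1)
--         j1 = R - min_len + 1
--         if j0 <= j1:
--             starts.extend(range(j0, j1 + 1))
--     return starts
-- ===== SOURCE B (Python) =====
-- from typing import List
--
-- def _all_valid_starts_for_length(cs: List[int], min_len: int, after_idx: int = -1) -> List[int]:
--     if min_len <= 0:
--         return []
--     n = len(cs)
--     ones_from = [0] * (n + 1)
--     for i in range(n - 1, -1, -1):
--         ones_from[i] = ones_from[i + 1] + 1 if cs[i] == 1 else 0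
--     return [i for i in range(n) if i > after_idx and ones_from[i] >= min_len]
-- ===== Notes on version B (the rewrite author's own statement) =====
-- stated objective: alternative
-- what changed: Replaces the explicit run-detection helper (nested while loops collecting (L,R) runs, then per-run range arithmetic) with a right-to-left suffix table of consecutive-ones counts followed by a single forward threshold scan over all indices.
import Mathlib
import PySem

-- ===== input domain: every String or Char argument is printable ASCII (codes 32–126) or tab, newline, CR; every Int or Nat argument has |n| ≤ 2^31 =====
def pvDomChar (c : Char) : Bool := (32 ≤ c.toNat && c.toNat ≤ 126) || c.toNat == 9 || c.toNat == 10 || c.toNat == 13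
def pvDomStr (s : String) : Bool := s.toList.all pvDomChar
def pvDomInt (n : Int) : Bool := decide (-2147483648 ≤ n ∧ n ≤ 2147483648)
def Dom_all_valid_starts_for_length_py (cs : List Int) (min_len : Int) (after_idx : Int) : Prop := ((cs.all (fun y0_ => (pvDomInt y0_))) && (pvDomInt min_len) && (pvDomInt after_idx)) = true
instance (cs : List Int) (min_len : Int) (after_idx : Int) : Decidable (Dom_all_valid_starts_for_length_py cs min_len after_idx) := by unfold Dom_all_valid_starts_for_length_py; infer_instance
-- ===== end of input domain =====

-- B replaces A's explicit run-detection helper by a suffix table of consecutive-ones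
-- counts plus one threshold scan (objective: alternative decomposition, same cost).

-- ===== PORT A =====
-- inner 'while j + 1 < n and cs[j + 1] == 1: j += 1'
def findRunsInner (cs : List Int) (n j : Nat) : Nat :=
  if h : j + 1 < n ∧ cs.getD (j + 1) 0 = 1 then findRunsInner cs n (j + 1) else j
termination_by n - j
decreasing_by omega

theorem findRunsInner_ge (cs : List Int) (n j : Nat) : j ≤ findRunsInner cs n j := by
  unfold findRunsInner
  split
  · exact Nat.le_trans (by omega) (findRunsInner_ge cs n (j + 1))
  · exact Nat.le_refl j
termination_by n - j
decreasing_by omega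

-- outer 'while i < n' of _find_all_runs_of_ones
def findRunsLoop (cs : List Int) (n i : Nat) : List (Int × Int) :=
  if h : i < n then
    if cs.getD i 0 = 1 then
      let j := findRunsInner cs n i
      ((i : Int), (j : Int)) :: findRunsLoop cs n (j + 1)
    else
      findRunsLoop cs n (i + 1)
  else []
termination_by n - i
decreasing_by
  · have := findRunsInner_ge cs n i; omega
  · omega

def find_all_runs_of_ones_py (cs : List Int) : List (Int × Int) :=
  findRunsLoop cs cs.length 0

-- body of A's 'for L, R in ...' loop
def aStep (min_len after_idx : Int) (starts : List Int) (LR : Int × Int) : List Int :=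
  if LR.2 - LR.1 + 1 < min_len then starts
  else
    let j0 := max LR.1 (after_idx + 1)
    let j1 := LR.2 - min_len + 1
    if j0 ≤ j1 then starts ++ PySem.List.pyRange j0 (j1 + 1) 1 else starts

def all_valid_starts_for_length_py (cs : List Int) (min_len : Int) (after_idx : Int) : List Int :=
  if min_len ≤ 0 then []
  else (find_all_runs_of_ones_py cs).foldl (aStep min_len after_idx) []

-- ===== PORT B =====
-- suffix table: ones_from[i] = number of consecutive 1s starting at i (right-to-left scan)
def onesFromTable (cs : List Int) : List Int :=
  cs.foldr (fun c acc => (if c = 1 then acc.headD 0 + 1 else 0) :: acc) [0]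

def all_valid_starts_for_length_py_alt (cs : List Int) (min_len : Int) (after_idx : Int) : List Int :=
  if min_len ≤ 0 then []
  else
    ((List.range cs.length).filter
        (fun (i : Nat) => decide (after_idx < (i : Int)) && decide (min_len ≤ (onesFromTable cs).getD i 0))).map
      (fun (i : Nat) => (i : Int))

-- ===== PRECONDITION & SPEC =====
def Spec_all_valid_starts_for_length_py (cs : List Int) (min_len : Int) (after_idx : Int) (out : List Int) : Prop := out = all_valid_starts_for_length_py_alt cs min_len after_idx
instance (cs : List Int) (min_len : Int) (after_idx : Int) (out : List Int) : Decidable (Spec_all_valid_starts_for_length_py cs min_len after_idx out) := by unfold Spec_all_valid_starts_for_length_py; infer_instance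

-- ===== CLAIM (what is proved, stated in full; the proofs are below) =====
def Claim_equal_all_valid_starts_for_length_py : Prop := ∀ (cs : List Int) (min_len : Int) (after_idx : Int), Dom_all_valid_starts_for_length_py cs min_len after_idx → Spec_all_valid_starts_for_length_py cs min_len after_idx (all_valid_starts_for_length_py cs min_len after_idx)

-- ===== LEMMAS AND PROOFS =====

-- number of consecutive 1s at the head of a list
def cnt : List Int → Nat
  | [] => 0
  | c :: t => if c = 1 then cnt t + 1 else 0

theorem onesFromTable_head (cs : List Int) : (onesFromTable cs).headD 0 = (cnt cs : Int) := by
  induction cs with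
  | nil => simp [onesFromTable, cnt]
  | cons c t ih =>
    simp only [onesFromTable, List.foldr_cons, cnt] at *
    split <;> simp_all

theorem onesFromTable_getD (cs : List Int) (i : Nat) :
    (onesFromTable cs).getD i 0 = (cnt (cs.drop i) : Int) := by
  induction cs generalizing i with
  | nil => cases i <;> simp [onesFromTable, cnt]
  | cons c t ih =>
    cases i with
    | zero =>
      have h := onesFromTable_head (c :: t)
      simpa [List.getD] using h
    | succ k =>
      simpa [onesFromTable, List.getD] using ih k

theorem cnt_drop (cs : List Int) (k : Nat) (h : k < cs.length) :
    cnt (cs.drop k) = if cs.getD k 0 = 1 then cnt (cs.drop (k + 1)) + 1 else 0 := by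
  rw [List.drop_eq_getElem_cons h, cnt, List.getD_eq_getElem _ _ h]

theorem cnt_drop_len (cs : List Int) (k : Nat) (h : cs.length ≤ k) : cnt (cs.drop k) = 0 := by
  rw [List.drop_eq_nil_of_le h]; rfl

theorem cnt_drop_succ_of_pos (cs : List Int) (k : Nat) (h : 0 < cnt (cs.drop k)) :
    cnt (cs.drop (k + 1)) = cnt (cs.drop k) - 1 := by
  by_cases hk : k < cs.length
  · rw [cnt_drop cs k hk] at h ⊢
    split_ifs at h ⊢ <;> omega
  · rw [cnt_drop_len cs k (by omega)] at h; omega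

theorem cnt_window (cs : List Int) (k m : Nat) (h : cnt (cs.drop k) = m) :
    ∀ d, d ≤ m → cnt (cs.drop (k + d)) = m - d := by
  intro d
  induction d with
  | zero => intro _; simpa using h
  | succ e ih =>
    intro hd
    have h1 : cnt (cs.drop (k + e)) = m - e := ih (by omega)
    have h2 : cnt (cs.drop (k + e + 1)) = cnt (cs.drop (k + e)) - 1 :=
      cnt_drop_succ_of_pos cs (k + e) (by omega)
    have : k + (e + 1) = k + e + 1 := by omega
    rw [this, h2, h1]; omega

theorem inner_spec (cs : List Int) (n j : Nat) (hn : n = cs.length) (hj : j < n)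
    (h1 : cs.getD j 0 = 1) :
    j ≤ findRunsInner cs n j ∧ findRunsInner cs n j < n ∧
      cnt (cs.drop j) = findRunsInner cs n j + 1 - j ∧
      cnt (cs.drop (findRunsInner cs n j + 1)) = 0 := by
  unfold findRunsInner
  split
  · rename_i hcond
    have ih := inner_spec cs n (j + 1) hn (by omega) hcond.2
    have hc : cnt (cs.drop j) = cnt (cs.drop (j + 1)) + 1 := by
      rw [cnt_drop cs j (by omega), if_pos h1]
    refine ⟨by omega, ih.2.1, ?_, ih.2.2.2⟩
    rw [hc, ih.2.2.1]
    have := ih.1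
    omega
  · rename_i hcond
    have hz : cnt (cs.drop (j + 1)) = 0 := by
      by_cases h2 : j + 1 < n
      · have : ¬ cs.getD (j + 1) 0 = 1 := fun hh => hcond ⟨h2, hh⟩
        rw [cnt_drop cs (j + 1) (by omega), if_neg this]
      · exact cnt_drop_len cs (j + 1) (by omega)
    have hc : cnt (cs.drop j) = cnt (cs.drop (j + 1)) + 1 := by
      rw [cnt_drop cs j (by omega), if_pos h1]
    exact ⟨Nat.le_refl j, hj, by omega, hz⟩
termination_by n - j
decreasing_by omega

-- strictly increasing lists with same members are equal
theorem eq_of_pairwise_lt_of_mem_iff (l1 l2 : List Int)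
    (h1 : l1.Pairwise (· < ·)) (h2 : l2.Pairwise (· < ·))
    (hm : ∀ x, x ∈ l1 ↔ x ∈ l2) : l1 = l2 := by
  have n1 : l1.Nodup := h1.imp (fun h => ne_of_lt h)
  have n2 : l2.Nodup := h2.imp (fun h => ne_of_lt h)
  have hp : l1.Perm l2 := (List.perm_ext_iff_of_nodup n1 n2).mpr hm
  exact hp.eq_of_sorted (fun a b _ _ hab hba => le_antisymm hab hba)
    (h1.imp le_of_lt) (h2.imp le_of_lt)

-- the per-run window: filtering [i, r] by the threshold conditions gives A's range
theorem window_eq (min_len after_idx : Int) (hml : 0 < min_len) (i r : Nat) (hir : i ≤ r)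
    (cs : List Int) (hcnt : ∀ k, i ≤ k → k ≤ r → cnt (cs.drop k) = r + 1 - k) :
    ((List.range' i (r + 1 - i)).filter
        (fun (k : Nat) => decide (after_idx < (k : Int)) && decide (min_len ≤ (cnt (cs.drop k) : Int)))).map
      (fun (k : Nat) => (k : Int))
    = PySem.List.pyRange (max (i : Int) (after_idx + 1)) ((r : Int) - min_len + 2) 1 := by
  apply eq_of_pairwise_lt_of_mem_iff
  · exact List.Pairwise.map _ (fun a b (hab : a < b) => by exact_mod_cast hab)
      (List.Pairwise.sublist List.filter_sublist (List.pairwise_lt_range' 1))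
  · exact PySem.List.pairwise_lt_pyRange_one ..
  · intro x
    simp only [List.mem_map, List.mem_filter, List.mem_range'_1, PySem.List.mem_pyRange_one,
      Bool.and_eq_true, decide_eq_true_eq]
    constructor
    · rintro ⟨k, ⟨⟨hk1, hk2⟩, hax, hml⟩, rfl⟩
      rw [hcnt k hk1 (by omega)] at hml
      rw [max_le_iff]
      refine ⟨⟨by omega, by omega⟩, by omega⟩
    · rintro ⟨hlo, hhi⟩
      rw [max_le_iff] at hlo
      refine ⟨x.toNat, ⟨⟨by omega, by omega⟩, by omega, ?_⟩, by omega⟩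
      rw [hcnt x.toNat (by omega) (by omega)]
      omega

-- aStep's branch structure collapses to appending one (possibly empty) range
theorem aStep_eq (min_len after_idx : Int) (starts0 : List Int) (i r : Int) :
    aStep min_len after_idx starts0 (i, r)
      = starts0 ++ PySem.List.pyRange (max i (after_idx + 1)) (r - min_len + 2) 1 := by
  simp only [aStep]
  split_ifs with h1 h2
  · rw [PySem.List.pyRange_one_eq_nil (by omega), List.append_nil]
  · rw [show r - min_len + 1 + 1 = r - min_len + 2 from by ring]
  · rw [PySem.List.pyRange_one_eq_nil (by omega), List.append_nil]

-- the outer loop, started anywhere, produces exactly the filtered indices ≥ i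
theorem loop_spec (cs : List Int) (min_len after_idx : Int) (hml : 0 < min_len)
    (i : Nat) (starts0 : List Int) :
    (findRunsLoop cs cs.length i).foldl (aStep min_len after_idx) starts0
      = starts0 ++ ((List.range' i (cs.length - i)).filter
          (fun (k : Nat) => decide (after_idx < (k : Int)) && decide (min_len ≤ (cnt (cs.drop k) : Int)))).map
            (fun (k : Nat) => (k : Int)) := by
  rw [findRunsLoop]
  split
  · rename_i h
    split
    · rename_i h1
      obtain ⟨hge, hlt, hc, hz⟩ := inner_spec cs cs.length i rfl h h1
      have hcnt : ∀ k, i ≤ k → k ≤ findRunsInner cs cs.length i →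
          cnt (cs.drop k) = findRunsInner cs cs.length i + 1 - k := by
        intro k hk1 hk2
        have := cnt_window cs i _ hc (k - i) (by omega)
        have hki : i + (k - i) = k := by omega
        rw [hki] at this
        omega
      rw [List.foldl_cons,
        loop_spec cs min_len after_idx hml (findRunsInner cs cs.length i + 1) _,
        aStep_eq]
      have hsplit : List.range' i (cs.length - i)
          = List.range' i (findRunsInner cs cs.length i + 1 - i)
            ++ List.range' (findRunsInner cs cs.length i + 1)
                (cs.length - (findRunsInner cs cs.length i + 1)) := by
        have hb := List.range'_append (s := i) (m := findRunsInner cs cs.length i + 1 - i)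
          (n := cs.length - (findRunsInner cs cs.length i + 1)) (step := 1)
        simp only [Nat.one_mul] at hb
        rw [show i + (findRunsInner cs cs.length i + 1 - i) = findRunsInner cs cs.length i + 1 by omega] at hb
        rw [show findRunsInner cs cs.length i + 1 - i + (cs.length - (findRunsInner cs cs.length i + 1)) = cs.length - i by omega] at hb
        exact hb.symm
      rw [hsplit, List.filter_append, List.map_append, ← List.append_assoc]
      congr 1
      rw [window_eq min_len after_idx hml i (findRunsInner cs cs.length i) hge cs hcnt]
    · rename_i h1
      rw [loop_spec cs min_len after_idx hml (i + 1) starts0]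
      have hstep : List.range' i (cs.length - i) = i :: List.range' (i + 1) (cs.length - (i + 1)) := by
        rw [show cs.length - i = (cs.length - (i + 1)) + 1 by omega, List.range'_succ]
      rw [hstep, List.filter_cons]
      have hz : cnt (cs.drop i) = 0 := by rw [cnt_drop cs i h, if_neg h1]
      rw [hz]
      simp only [Nat.cast_zero]
      rw [if_neg (by simp only [Bool.and_eq_true, decide_eq_true_eq, not_and]; intro _; omega)]
  · rename_i h
    rw [show cs.length - i = 0 by omega]
    simp [List.range']
termination_by cs.length - i
decreasing_by
  · have := findRunsInner_ge cs cs.length i; omega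
  · omega

-- ===== VERDICT (by name: the statement is the Claim_ definition above) =====
theorem all_valid_starts_for_length_py_spec : Claim_equal_all_valid_starts_for_length_py := by
  intro cs min_len after_idx _
  unfold Spec_all_valid_starts_for_length_py all_valid_starts_for_length_py
    all_valid_starts_for_length_py_alt find_all_runs_of_ones_py
  by_cases hml : min_len ≤ 0
  · rw [if_pos hml, if_pos hml]
  · rw [if_neg hml, if_neg hml]
    rw [loop_spec cs min_len after_idx (by omega) 0 []]
    rw [List.nil_append, List.range_eq_range', Nat.sub_zero]
    congr 1
    apply List.filter_congr
    intro k _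
    rw [onesFromTable_getD]
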